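-- pv_equiv track=rewrite | github.com/Karvy-Singh/TravelRecommend | irNml3.py | in_month_range
-- ===== SOURCE A (Python) =====
-- MONTH_MAP = {
--     m.lower(): i for i, m in enumerate(
--         ["January","February","March","April","May","June",
--          "July","August","September","October","November","December"],
--         start=1
--     )
-- }
--
-- def in_month_range(range_str, month_str):
--     """
--     Check if month_str (e.g. "May") falls within a range_str like "October-June".
--     Handles wrap-around ranges.
--     """
--     if not isinstance(range_str, str) or not month_str:
--         return False
--
--     t = month_str.strip().lower()
--     target = MONTH_MAP.get(t)
--     if target is None:
--         return False
--
--     parts = [p.strip().lower() for p in range_str.split('-', 1)]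
--     if len(parts) == 2:
--         start = MONTH_MAP.get(parts[0])
--         end   = MONTH_MAP.get(parts[1])
--         if start is None or end is None:
--             return False
--         if start <= end:
--             return start <= target <= end
--         else:
--             # e.g. October (10) → June (6): wrap around year end
--             return target >= start or target <= end
--     else:
--         # single month or free‐text match
--         return t in range_str.lower()
-- ===== SOURCE B (Python) =====
-- MONTH_MAP = {
--     m.lower(): i for i, m in enumerate(
--         ["January","February","March","April","May","June",
--          "July","August","September","October","November","December"],
--         start=1
--     )
-- }
--
-- def in_month_range(range_str, month_str):
--     """Check if month_str falls within a range_str like "October-June" (wrap-around handled)."""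
--     if not isinstance(range_str, str) or not month_str:
--         return False
--
--     t = month_str.strip().lower()
--     target = MONTH_MAP.get(t)
--     if target is None:
--         return False
--
--     parts = [p.strip().lower() for p in range_str.split('-', 1)]
--     if len(parts) == 2:
--         start = MONTH_MAP.get(parts[0])
--         end = MONTH_MAP.get(parts[1])
--         if start is None or end is None:
--             return False
--         # enumerate the months of the (possibly wrapping) range and test membership
--         span = (end - start) % 12
--         months = {(start - 1 + i) % 12 + 1 for i in range(span + 1)}
--         return target in months
--     else:
--         return t in range_str.lower()
-- ===== Notes on version B (the rewrite author's own statement) =====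
-- stated objective: alternative
-- what changed: The two-part case replaces A's start<=end vs wrap-around endpoint-comparison branches with a single path that enumerates the (end-start) mod 12 + 1 months of the range by stepping (start-1+i) mod 12 + 1 into a set and tests membership.
import Mathlib
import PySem

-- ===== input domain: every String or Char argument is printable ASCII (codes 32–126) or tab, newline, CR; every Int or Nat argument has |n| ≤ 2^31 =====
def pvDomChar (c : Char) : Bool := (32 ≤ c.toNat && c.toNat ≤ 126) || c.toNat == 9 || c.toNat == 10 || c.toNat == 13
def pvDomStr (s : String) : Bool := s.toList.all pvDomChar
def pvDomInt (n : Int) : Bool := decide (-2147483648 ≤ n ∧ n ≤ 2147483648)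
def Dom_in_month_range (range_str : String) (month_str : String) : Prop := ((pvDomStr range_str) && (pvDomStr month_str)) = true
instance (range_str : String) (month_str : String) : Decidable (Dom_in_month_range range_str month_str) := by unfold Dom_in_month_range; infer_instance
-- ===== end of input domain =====

-- B replaces A's start<=end vs wrap endpoint-comparison branches by enumerating the months of the
-- (possibly wrapping) range mod 12 into a set and testing membership; objective: alternative (same cost).


-- ===== PORT A =====
-- MONTH_MAP: the module-level dict comprehension, written out as the literal dict it builds
def monthMap : PySem.Dict String Int :=
  PySem.Dict.ofList [("january",1),("february",2),("march",3),("april",4),("may",5),("june",6),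
    ("july",7),("august",8),("september",9),("october",10),("november",11),("december",12)]

def in_month_range (range_str : String) (month_str : String) : Bool :=
  -- `not isinstance(range_str, str)` is always False under the type convention; `not month_str` is the "" test
  if month_str = "" then false else
  let t := PySem.Str.lower (PySem.Str.strip month_str)
  match PySem.Dict.get? monthMap t with
  | none => false
  | some target =>
    match PySem.Str.splitMax? range_str "-" 1 with
    | none => false  -- unreachable: the separator "-" is non-empty
    | some ps =>
      let parts := ps.map (fun p => PySem.Str.lower (PySem.Str.strip p))
      match parts with
      | [p0, p1] =>  -- len(parts) == 2
        match PySem.Dict.get? monthMap p0, PySem.Dict.get? monthMap p1 with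
        | some start, some «end» =>
          if start ≤ «end» then decide (start ≤ target ∧ target ≤ «end»)
          else decide (target ≥ start ∨ target ≤ «end»)
        | _, _ => false  -- start is None or end is None
      | _ => PySem.Str.isIn t (PySem.Str.lower range_str)  -- single month or free-text match

-- ===== PORT B =====
-- B's own copy of MONTH_MAP (Source B defines its own module-level dict)
def monthMapB : PySem.Dict String Int :=
  PySem.Dict.ofList [("january",1),("february",2),("march",3),("april",4),("may",5),("june",6),
    ("july",7),("august",8),("september",9),("october",10),("november",11),("december",12)]

def in_month_range_alt (range_str : String) (month_str : String) : Bool :=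
  if month_str = "" then false else
  let t := PySem.Str.lower (PySem.Str.strip month_str)
  (PySem.Dict.get? monthMapB t).elim false (fun target =>
    (PySem.Str.splitMax? range_str "-" 1).elim false (fun ps =>
      let parts := ps.map (fun p => PySem.Str.lower (PySem.Str.strip p))
      if parts.length = 2 then
        (PySem.Dict.get? monthMapB (PySem.List.pyGetD parts 0 "")).elim false (fun start =>
          (PySem.Dict.get? monthMapB (PySem.List.pyGetD parts 1 "")).elim false (fun «end» =>
            -- enumerate the months of the (possibly wrapping) range, collect them into a set
            let span := PySem.Int.mod («end» - start) 12
            let months := PySem.Set.ofList ((PySem.List.pyRange 0 (span + 1) 1).map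
              (fun i => PySem.Int.mod (start - 1 + i) 12 + 1))
            PySem.Set.contains months target))
      else PySem.Str.isIn t (PySem.Str.lower range_str)))

-- ===== PRECONDITION & SPEC =====
def Spec_in_month_range (range_str : String) (month_str : String) (out : Bool) : Prop := out = in_month_range_alt range_str month_str
instance (range_str : String) (month_str : String) (out : Bool) : Decidable (Spec_in_month_range range_str month_str out) := by unfold Spec_in_month_range; infer_instance

-- ===== CLAIM (what is proved, stated in full; the proofs are below) =====
def Claim_equal_in_month_range : Prop := ∀ (range_str : String) (month_str : String), Dom_in_month_range range_str month_str → Spec_in_month_range range_str month_str (in_month_range range_str month_str)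

-- ===== LEMMAS AND PROOFS =====

-- every value stored in monthMap is one of the month numbers 1..12
def monthVals : List Int := [1,2,3,4,5,6,7,8,9,10,11,12]

theorem get?_monthMap_mem (k : String) (v : Int) (h : PySem.Dict.get? monthMap k = some v) :
    v ∈ monthVals := by
  have hit : monthMap.items = [("january",1),("february",2),("march",3),("april",4),("may",5),
      ("june",6),("july",7),("august",8),("september",9),("october",10),("november",11),("december",12)] := by
    decide
  simp [PySem.Dict.get?, hit] at h
  rcases h with ⟨a, h⟩
  simp [monthVals]
  tauto

-- the core: A's two endpoint comparisons agree with B's mod-12 enumeration plus membership,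
-- for month numbers 1..12 (checked exhaustively by the kernel)
theorem core_eq : ∀ s ∈ monthVals, ∀ e ∈ monthVals, ∀ t ∈ monthVals,
    (if s ≤ e then decide (s ≤ t ∧ t ≤ e) else decide (t ≥ s ∨ t ≤ e)) =
    PySem.Set.contains (PySem.Set.ofList ((PySem.List.pyRange 0 (PySem.Int.mod (e - s) 12 + 1) 1).map
      (fun i => PySem.Int.mod (s - 1 + i) 12 + 1))) t := by
  decide

-- ===== VERDICT (by name: the statement is the Claim_ definition above) =====
theorem in_month_range_spec : Claim_equal_in_month_range := by
  intro range_str month_str _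
  unfold Spec_in_month_range in_month_range in_month_range_alt
  by_cases hm : month_str = ""
  · subst hm; rfl
  · rw [if_neg hm, if_neg hm]
    simp only []
    have hB : ∀ k, PySem.Dict.get? monthMapB k = PySem.Dict.get? monthMap k := fun _ => rfl
    simp only [hB]
    cases ht : PySem.Dict.get? monthMap (PySem.Str.lower (PySem.Str.strip month_str)) with
    | none => rfl
    | some target =>
      cases hs : PySem.Str.splitMax? range_str "-" 1 with
      | none => rfl
      | some ps =>
        match hp : ps.map (fun p => PySem.Str.lower (PySem.Str.strip p)) with
        | [] =>
          have hl := congrArg List.length hp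
          simp at hl
          simp [hl]
        | [_] =>
          have hl := congrArg List.length hp
          simp at hl
          simp [hp, hl]
        | p0 :: p1 :: _ :: _ =>
          have hl := congrArg List.length hp
          simp at hl
          simp [hp, hl]
        | [p0, p1] =>
          have e0 : PySem.List.pyGetD [p0, p1] (0 : Int) "" = p0 := rfl
          have e1 : PySem.List.pyGetD [p0, p1] (1 : Int) "" = p1 := rfl
          simp only [hp, e0, e1, Option.elim, List.length_cons, List.length_nil, if_true]
          cases h0 : PySem.Dict.get? monthMap p0 with
          | none => simp
          | some start =>
            cases h1 : PySem.Dict.get? monthMap p1 with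
            | none => simp
            | some e =>
              exact core_eq start (get?_monthMap_mem _ _ h0) e (get?_monthMap_mem _ _ h1)
                target (get?_monthMap_mem _ _ ht)
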